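-- pv_equiv track=rewrite | github.com/hxz456/CC-LAB | Practical6/main.py | product_of_three_largest_distinct
-- ===== SOURCE A (Python) =====
-- class PriorityQueue:
--     def __init__(self):
--         self.queue = []
--
--     def insert(self, element):
--         self.queue.append(element)
--         self.queue.sort()
--
--     def remove(self):
--         if not self.is_empty():
--             return self.queue.pop(0)
--         return None
--
--     def is_empty(self):
--         return len(self.queue) == 0
--
-- def product_of_three_largest_distinct(nums):
--     # Remove duplicates by converting the list to a set
--     nums_set = set(nums)
--
--     # Initialize a priority queue
--     pq = PriorityQueue()
--
--     # Add elements to the priority queue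
--     for num in nums_set:
--         pq.insert(num)
--         if len(pq.queue) > 3:
--             pq.remove()
--
--     # Check if there are at least three distinct elements
--     if len(pq.queue) < 3:
--         raise ValueError("The list must contain at least three distinct elements.")
--
--     # Calculate the product of the three largest distinct elements
--     product = 1
--     while not pq.is_empty():
--         product *= pq.remove()
--
--     return product
-- ===== SOURCE B (Python) =====
-- def product_of_three_largest_distinct(nums):
--     distinct = sorted(set(nums))
--     if len(distinct) < 3:
--         raise ValueError("The list must contain at least three distinct elements.")
--     product = 1
--     for v in distinct[-3:]:
--         product *= v
--     return product
-- ===== Notes on version B (the rewrite author's own statement) =====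
-- stated objective: simpler
-- what changed: Replaces A's incremental capped priority-queue maintenance (sort after every insert, pop the minimum when the queue exceeds 3) with a single sort of the distinct values followed by a slice of the last three and a product accumulator.
import Mathlib
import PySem

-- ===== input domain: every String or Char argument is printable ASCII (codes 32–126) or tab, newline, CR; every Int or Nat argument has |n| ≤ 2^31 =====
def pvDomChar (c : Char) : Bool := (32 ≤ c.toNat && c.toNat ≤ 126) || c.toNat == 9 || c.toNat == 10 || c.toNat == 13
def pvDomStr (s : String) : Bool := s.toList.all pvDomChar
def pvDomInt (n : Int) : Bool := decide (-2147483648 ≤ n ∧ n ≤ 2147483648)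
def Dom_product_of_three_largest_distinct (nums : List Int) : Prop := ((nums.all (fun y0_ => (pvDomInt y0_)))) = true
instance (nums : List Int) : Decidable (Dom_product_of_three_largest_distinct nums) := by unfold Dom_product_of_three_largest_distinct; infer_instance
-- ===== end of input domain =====

-- B replaces A's capped priority-queue maintenance by one sort of the distinct values
-- plus a slice of the last three (objective: simpler).

-- ===== PORT A =====
-- PriorityQueue.insert: append then sort the queue.
def pvPqInsert (q : List Int) (x : Int) : List Int :=
  PySem.List.sorted (q ++ [x]) (fun v => v) false

-- the final while loop: product *= pq.remove()  (remove = pop(0))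
def pvPopProd : List Int → Int → Int
  | [], p => p
  | x :: rest, p => pvPopProd rest (p * x)

def product_of_three_largest_distinct (nums : List Int) : Int :=
  let numsSet := PySem.Set.ofList nums
  let pq := numsSet.foldl (fun q num =>
      let q1 := pvPqInsert q num
      if q1.length > 3 then q1.tail else q1) []
  if pq.length < 3 then 0   -- Python raises ValueError here; excluded by Pre_
  else pvPopProd pq 1

-- ===== PORT B =====
def product_of_three_largest_distinct_alt (nums : List Int) : Int :=
  let distinct := PySem.List.sorted (PySem.Set.ofList nums) (fun v => v) false
  if distinct.length < 3 then 0   -- Python raises ValueError here; excluded by Pre_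
  else (PySem.List.slice distinct (some (-3)) none).foldl (fun p v => p * v) 1

-- ===== PRECONDITION & SPEC =====
-- A (and B) raise ValueError when the list has fewer than three distinct elements.
def Pre_product_of_three_largest_distinct (nums : List Int) : Prop :=
  3 ≤ (PySem.Set.ofList nums).length
instance (nums : List Int) : Decidable (Pre_product_of_three_largest_distinct nums) := by
  unfold Pre_product_of_three_largest_distinct; infer_instance

def pvWitness_product_of_three_largest_distinct : List Int := [1, 2, 3]

def Spec_product_of_three_largest_distinct (nums : List Int) (out : Int) : Prop := out = product_of_three_largest_distinct_alt nums
instance (nums : List Int) (out : Int) : Decidable (Spec_product_of_three_largest_distinct nums out) := by unfold Spec_product_of_three_largest_distinct; infer_instance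

-- ===== CLAIM (what is proved, stated in full; the proofs are below) =====
def Claim_equal_product_of_three_largest_distinct : Prop := ∀ (nums : List Int), Dom_product_of_three_largest_distinct nums → Pre_product_of_three_largest_distinct nums → Spec_product_of_three_largest_distinct nums (product_of_three_largest_distinct nums)

-- ===== LEMMAS AND PROOFS =====

theorem pvPopProd_eq_foldl (l : List Int) (p : Int) :
    pvPopProd l p = l.foldl (fun a x => a * x) p := by
  induction l generalizing p with
  | nil => rfl
  | cons x rest ih => simp [pvPopProd, ih]

-- sorted of a nodup list is strictly increasing
theorem pvSorted_lt_of_nodup (xs : List Int) (h : xs.Nodup) :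
    (PySem.List.sorted xs (fun v => v) false).Pairwise (· < ·) := by
  have hle := PySem.List.sorted_pairwise xs (fun v => v)
  have hnd : (PySem.List.sorted xs (fun v => v) false).Nodup :=
    (PySem.List.sorted_perm xs (fun v => v) false).nodup_iff.mpr h
  exact (hle.and hnd).imp (fun {a b} hab => lt_of_le_of_ne hab.1 hab.2)

-- One step of A's loop, in P-queue form.
def pvStep (q : List Int) (d : Int) : List Int :=
  let q1 := pvPqInsert q d
  if q1.length > 3 then q1.tail else q1

-- key step: inserting d into the kept top-3 suffix of a strictly sorted t
theorem pvStep_top3 (t : List Int) (d : Int)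
    (ht : t.Pairwise (· < ·)) (hd : d ∉ t) :
    pvStep (t.drop (t.length - 3)) d
      = (PySem.List.sorted (t ++ [d]) (fun v => v) false).drop (t.length + 1 - 3) := by
  simp only [pvStep, pvPqInsert]
  by_cases hn : t.length ≤ 2
  · have h0 : t.length - 3 = 0 := by omega
    have h1 : t.length + 1 - 3 = 0 := by omega
    have hlen : (PySem.List.sorted (t ++ [d]) (fun v => v) false).length = t.length + 1 := by
      rw [PySem.List.length_sorted]; simp
    rw [h0, h1, List.drop_zero, List.drop_zero, if_neg (by omega)]
  · push Not at hn
    have hn3 : 3 ≤ t.length := by omega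
    obtain ⟨a, b, c, hq⟩ : ∃ a b c, t.drop (t.length - 3) = [a, b, c] :=
      List.length_eq_three.mp (by rw [List.length_drop]; omega)
    have htact : t = t.take (t.length - 3) ++ [a, b, c] := by
      rw [← hq, List.take_append_drop]
    set u := t.take (t.length - 3) with hu
    have hulen : u.length = t.length - 3 := by
      rw [hu, List.length_take]; omega
    have ht' : (u ++ [a, b, c]).Pairwise (· < ·) := htact ▸ ht
    rw [List.pairwise_append] at ht'
    obtain ⟨hpu, hpq, hcross⟩ := ht'
    have hab : a < b := by simp [List.pairwise_cons] at hpq; tauto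
    have hac : a < c := by simp [List.pairwise_cons] at hpq; tauto
    have hbc : b < c := by simp [List.pairwise_cons] at hpq; tauto
    have hd' : d ∉ u ++ [a, b, c] := htact ▸ hd
    simp only [List.mem_append, List.mem_cons, List.not_mem_nil] at hd'
    push Not at hd'
    obtain ⟨hdu, hda, hdb, hdc, -⟩ := hd'
    have hndu : u.Nodup := hpu.imp (fun h => ne_of_lt h)
    rw [hq]
    rcases lt_trichotomy d a with hlt | heq | hgt
    · -- d below the kept three: queue unchanged, top three unchanged
      have hs1 : PySem.List.sorted ([a, b, c] ++ [d]) (fun v => v) false = [d, a, b, c] := by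
        apply PySem.List.sorted_eq_of_perm_of_pairwise_lt
        · exact List.perm_append_comm (l₁ := [d]) (l₂ := [a, b, c])
        · simp only [List.pairwise_cons, List.mem_cons, List.not_mem_nil]
          refine ?_
          constructor
          · rintro y (rfl | rfl | rfl | h) <;> first | omega | cases h
          · constructor
            · rintro y (rfl | rfl | h) <;> first | omega | cases h
            · constructor
              · rintro y (rfl | h) <;> first | omega | cases h
              · simp
        -- strict order d < a < b < c
      set w := PySem.List.sorted (u ++ [d]) (fun v => v) false with hw
      have hwlen : w.length = t.length - 2 := by
        rw [hw, PySem.List.length_sorted]; simp [hulen]; omega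
      have hs2 : PySem.List.sorted (t ++ [d]) (fun v => v) false = w ++ [a, b, c] := by
        apply PySem.List.sorted_eq_of_perm_of_pairwise_lt
        · have p1 : (w ++ [a, b, c]).Perm ((u ++ [d]) ++ [a, b, c]) :=
            (PySem.List.sorted_perm (u ++ [d]) (fun v => v) false).append_right _
          have p2 : ((u ++ [d]) ++ [a, b, c]).Perm ((u ++ [a, b, c]) ++ [d]) := by
            rw [List.append_assoc, List.append_assoc]
            exact List.Perm.append_left u List.perm_append_comm
          have p3 : (u ++ [a, b, c]) ++ [d] = t ++ [d] := by rw [← htact]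
          exact (p1.trans p2).trans (p3 ▸ List.Perm.refl _)
        · rw [List.pairwise_append]
          refine ⟨pvSorted_lt_of_nodup (u ++ [d]) ?_, hpq, ?_⟩
          · simp only [List.nodup_append, List.nodup_cons, List.not_mem_nil, not_false_iff,
              List.nodup_nil, and_true]
            refine ⟨hndu, by simp, ?_⟩
            intro x hx y hy
            rw [List.mem_singleton] at hy
            subst hy
            exact fun h => hdu (h ▸ hx)
          · intro x hx y hy
            rw [hw, PySem.List.mem_sorted, List.mem_append, List.mem_singleton] at hx
            simp only [List.mem_cons, List.not_mem_nil, or_false] at hy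
            rcases hx with hx | rfl
            · rcases hy with rfl | rfl | rfl
              · exact hcross x hx y (by simp)
              · exact hcross x hx y (by simp)
              · exact hcross x hx y (by simp)
            · rcases hy with rfl | rfl | rfl <;> omega
      rw [hs1, hs2, if_pos (by simp), List.tail_cons]
      have hk : t.length + 1 - 3 = w.length := by omega
      rw [hk, List.drop_left]
    · exact absurd heq hda
    · -- d above the smallest kept value: a is evicted
      have hnbcd : ([b, c, d] : List Int).Nodup := by
        simp [List.nodup_cons]
        refine ⟨⟨ne_of_lt hbc, fun h => hdb h.symm⟩, fun h => hdc h.symm⟩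
      set r := PySem.List.sorted ([b, c, d] : List Int) (fun v => v) false with hr
      have hrlen : r.length = 3 := by rw [hr, PySem.List.length_sorted]; rfl
      have hmr : ∀ y ∈ r, y = b ∨ y = c ∨ y = d := by
        intro y hy
        rw [hr, PySem.List.mem_sorted] at hy
        simpa using hy
      have hs1 : PySem.List.sorted ([a, b, c] ++ [d]) (fun v => v) false = a :: r := by
        apply PySem.List.sorted_eq_of_perm_of_pairwise_lt
        · exact List.Perm.cons a (PySem.List.sorted_perm [b, c, d] (fun v => v) false)
        · rw [List.pairwise_cons]
          refine ⟨?_, pvSorted_lt_of_nodup _ hnbcd⟩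
          intro y hy
          rcases hmr y hy with rfl | rfl | rfl <;> omega
      have huar : ((u ++ [a]) ++ r).Pairwise (· < ·) := by
        rw [List.pairwise_append]
        refine ⟨?_, pvSorted_lt_of_nodup _ hnbcd, ?_⟩
        · rw [List.pairwise_append]
          refine ⟨hpu, by simp, ?_⟩
          intro x hx y hy
          rw [List.mem_singleton] at hy
          rw [hy]
          exact hcross x hx a (by simp)
        · intro x hx y hy
          rw [List.mem_append, List.mem_singleton] at hx
          rcases hx with hx | rfl
          · have hxa : x < a := hcross x hx a (by simp)
            rcases hmr y hy with rfl | rfl | rfl <;> omega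
          · rcases hmr y hy with rfl | rfl | rfl <;> omega
      have hs2 : PySem.List.sorted (t ++ [d]) (fun v => v) false = (u ++ [a]) ++ r := by
        apply PySem.List.sorted_eq_of_perm_of_pairwise_lt
        · have p1 : ((u ++ [a]) ++ r).Perm ((u ++ [a]) ++ [b, c, d]) :=
            List.Perm.append_left _ (PySem.List.sorted_perm [b, c, d] (fun v => v) false)
          have p2 : (u ++ [a]) ++ [b, c, d] = t ++ [d] := by
            rw [htact]; simp [List.append_assoc]
          exact p2 ▸ p1
        · exact huar
      rw [hs1, hs2]
      rw [if_pos (by simp [hrlen]), List.tail_cons]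
      have hk : t.length + 1 - 3 = (u ++ [a]).length := by simp [hulen]; omega
      rw [hk, List.drop_left]

-- loop invariant over the distinct elements
theorem pvInv (xs : List Int) (h : xs.Nodup) :
    xs.foldl pvStep []
      = (PySem.List.sorted xs (fun v => v) false).drop (xs.length - 3) := by
  induction xs using List.reverseRecOn with
  | nil => rfl
  | append_singleton ys d ih =>
    have hnd : ys.Nodup := (List.nodup_append.mp h).1
    have hdni : d ∉ ys := by simp [List.nodup_append] at h; tauto
    rw [List.foldl_append, List.foldl_cons, List.foldl_nil, ih hnd]
    have ht := pvSorted_lt_of_nodup ys hnd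
    have hd' : d ∉ PySem.List.sorted ys (fun v => v) false := by
      rw [PySem.List.mem_sorted]; exact hdni
    have hstep := pvStep_top3 (PySem.List.sorted ys (fun v => v) false) d ht hd'
    rw [PySem.List.length_sorted,
        PySem.List.sorted_eq_sorted_of_perm _ _ _ (fun a b hp => hp)
          ((PySem.List.sorted_perm ys (fun v => v) false).append_right [d])] at hstep
    rw [hstep]
    simp

-- ===== VERDICT (by name: the statement is the Claim_ definition above) =====
theorem product_of_three_largest_distinct_spec : Claim_equal_product_of_three_largest_distinct := by
  intro nums _ hpre
  unfold Pre_product_of_three_largest_distinct at hpre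
  unfold Spec_product_of_three_largest_distinct
  unfold product_of_three_largest_distinct product_of_three_largest_distinct_alt
  have hinv := pvInv (PySem.Set.ofList nums) (PySem.Set.nodup_ofList nums)
  have hfold : (PySem.Set.ofList nums).foldl (fun q num =>
      let q1 := pvPqInsert q num
      if q1.length > 3 then q1.tail else q1) [] = (PySem.Set.ofList nums).foldl pvStep [] := rfl
  set distinct := PySem.List.sorted (PySem.Set.ofList nums) (fun v => v) false with hdist
  have hlen : distinct.length = (PySem.Set.ofList nums).length :=
    PySem.List.length_sorted _ _ _
  simp only [hfold, hinv]
  have hdroplen : (distinct.drop ((PySem.Set.ofList nums).length - 3)).length = 3 := by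
    rw [List.length_drop, hlen]; omega
  rw [if_neg (by omega), if_neg (by omega)]
  rw [PySem.List.slice_from_neg_ofNat distinct 3 (by norm_num), hlen,
      pvPopProd_eq_foldl]
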